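-- pv_equiv track=rewrite | github.com/wkmp26/connect-x | agent_test.py | count_consecutive_score
-- ===== SOURCE A (Python) =====
-- def count_consecutive_score(row):
--     max_count_1 = count_1 = 0
--     max_count_2 = count_2 = 0
--
--     scoring = {
--         0: 0,
--         1: 0,
--         2: 10,
--         3: 40,
--     }
--
--     for r in row:
--
--         if r == 1:
--             count_1 += 1
--             count_2 = 0
--             max_count_1 = max(max_count_1,count_1)
--         elif r == 2:
--             count_2 += 1
--             count_1 = 0
--             max_count_2 = max(max_count_2,count_2)
--         else:
--             count_1 = 0
--             count_2 = 0
--     return scoring[max_count_1]- scoring[max_count_2]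
--     return scoring[max_count_1], -scoring[max_count_2]
--
--     if max_count_1 > max_count_2:
--         return max_count_1
--     else:
--         return -max_count_2
-- ===== SOURCE B (Python) =====
-- def count_consecutive_score(row):
--     # Two-phase: run-length segmentation first, then take the maxima per key.
--     runs = []
--     for r in row:
--         if runs and runs[-1][0] == r:
--             runs[-1][1] += 1
--         else:
--             runs.append([r, 1])
--     max_1 = max((n for k, n in runs if k == 1), default=0)
--     max_2 = max((n for k, n in runs if k == 2), default=0)
--     scoring = {0: 0, 1: 0, 2: 10, 3: 40}
--     return scoring[max_1] - scoring[max_2]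
-- ===== Notes on version B (the rewrite author's own statement) =====
-- stated objective: alternative
-- what changed: B first segments the row into a run-length list (key, length) in one pass and only then takes the maximum length per key, instead of A's four interleaved counter/maximum variables updated per element.
import Mathlib
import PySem

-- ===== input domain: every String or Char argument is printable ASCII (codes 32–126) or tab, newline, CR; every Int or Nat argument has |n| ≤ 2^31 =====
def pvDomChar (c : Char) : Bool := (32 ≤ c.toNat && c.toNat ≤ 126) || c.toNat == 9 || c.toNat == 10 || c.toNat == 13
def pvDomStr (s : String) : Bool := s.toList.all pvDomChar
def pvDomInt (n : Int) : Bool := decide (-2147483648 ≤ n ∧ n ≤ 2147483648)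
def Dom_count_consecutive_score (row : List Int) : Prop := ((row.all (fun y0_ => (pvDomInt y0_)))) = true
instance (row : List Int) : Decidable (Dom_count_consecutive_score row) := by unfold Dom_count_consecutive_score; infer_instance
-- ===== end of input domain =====

-- B builds the run-length segmentation of the row first and only then takes the
-- maximum run length per key, instead of A's four interleaved counters (alternative decomposition).

-- ===== PORT A =====
-- A's per-element step: (max_count_1, count_1, max_count_2, count_2)
def aStep (st : Int × Int × Int × Int) (r : Int) : Int × Int × Int × Int :=
  match st with
  | (m1, c1, m2, c2) =>
    if r = 1 then (max m1 (c1 + 1), c1 + 1, m2, 0)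
    else if r = 2 then (m1, 0, max m2 (c2 + 1), c2 + 1)
    else (m1, 0, m2, 0)

def pvScoring : PySem.Dict Int Int := PySem.Dict.ofList [(0, 0), (1, 0), (2, 10), (3, 40)]

-- `scoring[m]`; the `.getD 0` default is never reached inside Pre_ (KeyError inputs are excluded)
def pvScore (m : Int) : Int := (PySem.Dict.get? pvScoring m).getD 0

def count_consecutive_score (row : List Int) : Int :=
  let st := row.foldl aStep (0, 0, 0, 0)
  pvScore st.1 - pvScore st.2.2.1

-- ===== PORT B =====
-- runs are accumulated in REVERSE order (python appends at the end of the list; here we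
-- prepend to the accumulator and reverse once at the end), each entry = (key, run length)
def bStep (acc : List (Int × Int)) (r : Int) : List (Int × Int) :=
  match acc with
  | (k, n) :: rest => if k = r then (k, n + 1) :: rest else (r, 1) :: (k, n) :: rest
  | [] => [(r, 1)]

-- max((n for k, n in runs if k == v), default=0); run lengths are ≥ 1 so foldl max 0 is exact
def maxLenOf (v : Int) (runs : List (Int × Int)) : Int :=
  (runs.filterMap (fun kn => if kn.1 = v then some kn.2 else none)).foldl max 0

def count_consecutive_score_alt (row : List Int) : Int :=
  let runs := (row.foldl bStep []).reverse
  pvScore (maxLenOf 1 runs) - pvScore (maxLenOf 2 runs)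

-- ===== PRECONDITION & SPEC =====
-- Pre_ excludes exactly the rows containing four consecutive equal entries of value 1 or 2:
-- there the final run length exceeds 3 and both Pythons raise KeyError on the scoring lookup.
def Pre_count_consecutive_score (row : List Int) : Prop :=
  ∀ i < row.length, i + 3 < row.length →
    ¬ ((row.getD i 0 = row.getD (i+1) 0 ∧ row.getD (i+1) 0 = row.getD (i+2) 0 ∧
        row.getD (i+2) 0 = row.getD (i+3) 0) ∧ (row.getD i 0 = 1 ∨ row.getD i 0 = 2))
instance (row : List Int) : Decidable (Pre_count_consecutive_score row) := by
  unfold Pre_count_consecutive_score; infer_instance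

def pvWitness_count_consecutive_score : List Int := [1, 1, 2, 0, 2, 2, 2]

def Spec_count_consecutive_score (row : List Int) (out : Int) : Prop := out = count_consecutive_score_alt row
instance (row : List Int) (out : Int) : Decidable (Spec_count_consecutive_score row out) := by unfold Spec_count_consecutive_score; infer_instance

-- ===== CLAIM (what is proved, stated in full; the proofs are below) =====
def Claim_equal_count_consecutive_score : Prop := ∀ (row : List Int), Dom_count_consecutive_score row → Pre_count_consecutive_score row → Spec_count_consecutive_score row (count_consecutive_score row)

-- ===== LEMMAS AND PROOFS =====

-- maximum length among runs with key v (head-first form, matching the reversed accumulator)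
def maxK (v : Int) (l : List (Int × Int)) : Int :=
  l.foldr (fun kn b => if kn.1 = v then max kn.2 b else b) 0

-- current run length for key v (head of the reversed accumulator)
def curK (v : Int) (l : List (Int × Int)) : Int :=
  match l with
  | (k, n) :: _ => if k = v then n else 0
  | [] => 0

theorem maxK_bStep_self (acc : List (Int × Int)) (r : Int) :
    maxK r (bStep acc r) = max (maxK r acc) (curK r acc + 1) := by
  match acc with
  | [] => simp [bStep, maxK, curK]
  | (k, n) :: rest =>
    by_cases h : k = r <;> simp [bStep, maxK, curK, h] <;> omega

theorem curK_bStep_self (acc : List (Int × Int)) (r : Int) :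
    curK r (bStep acc r) = curK r acc + 1 := by
  match acc with
  | [] => simp [bStep, curK]
  | (k, n) :: rest =>
    by_cases h : k = r <;> simp [bStep, curK, h]

theorem maxK_bStep_ne (acc : List (Int × Int)) (r v : Int) (hv : v ≠ r) :
    maxK v (bStep acc r) = maxK v acc := by
  match acc with
  | [] => simp [bStep, maxK, Ne.symm hv]
  | (k, n) :: rest =>
    by_cases h : k = r <;> simp [bStep, maxK, h, Ne.symm hv]

theorem curK_bStep_ne (acc : List (Int × Int)) (r v : Int) (hv : v ≠ r) :
    curK v (bStep acc r) = 0 := by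
  match acc with
  | [] => simp [bStep, curK, Ne.symm hv]
  | (k, n) :: rest =>
    by_cases h : k = r <;> simp [bStep, curK, h, Ne.symm hv]

-- main invariant: A's fold state is determined by B's (reversed) run accumulator
theorem foldA_eq (row : List Int) : ∀ (acc : List (Int × Int)),
    row.foldl aStep (maxK 1 acc, curK 1 acc, maxK 2 acc, curK 2 acc)
      = (maxK 1 (row.foldl bStep acc), curK 1 (row.foldl bStep acc),
         maxK 2 (row.foldl bStep acc), curK 2 (row.foldl bStep acc)) := by
  induction row with
  | nil => intro acc; simp
  | cons r t ih =>
    intro acc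
    have hstep : aStep (maxK 1 acc, curK 1 acc, maxK 2 acc, curK 2 acc) r
        = (maxK 1 (bStep acc r), curK 1 (bStep acc r), maxK 2 (bStep acc r), curK 2 (bStep acc r)) := by
      by_cases h1 : r = 1
      · subst h1
        simp [aStep, maxK_bStep_self, curK_bStep_self,
          maxK_bStep_ne acc 1 2 (by norm_num), curK_bStep_ne acc 1 2 (by norm_num)]
      · by_cases h2 : r = 2
        · subst h2
          simp [aStep, maxK_bStep_self, curK_bStep_self,
            maxK_bStep_ne acc 2 1 (by norm_num), curK_bStep_ne acc 2 1 (by norm_num)]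
        · simp [aStep, h1, h2,
            maxK_bStep_ne acc r 1 (fun h => h1 h.symm), curK_bStep_ne acc r 1 (fun h => h1 h.symm),
            maxK_bStep_ne acc r 2 (fun h => h2 h.symm), curK_bStep_ne acc r 2 (fun h => h2 h.symm)]
    simp only [List.foldl_cons, hstep]
    exact ih (bStep acc r)

-- B's maximum over the reversed runs equals maxK over the accumulator
theorem maxLenOf_reverse (v : Int) (l : List (Int × Int)) :
    maxLenOf v l.reverse = maxK v l := by
  induction l with
  | nil => simp [maxLenOf, maxK]
  | cons kn t ih =>
    obtain ⟨k, n⟩ := kn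
    by_cases h : k = v
    · subst h
      simp only [maxLenOf, maxK] at ih ⊢
      rw [List.reverse_cons, List.filterMap_append, List.foldl_append, ih]
      simp
      omega
    · simp only [maxLenOf, maxK] at ih ⊢
      rw [List.reverse_cons, List.filterMap_append, List.foldl_append, ih]
      simp [h]

-- ===== VERDICT (by name: the statement is the Claim_ definition above) =====
theorem count_consecutive_score_spec : Claim_equal_count_consecutive_score := by
  intro row _ _
  unfold Spec_count_consecutive_score count_consecutive_score count_consecutive_score_alt
  have h := foldA_eq row []
  simp only [maxK, curK, List.foldr_nil] at h
  simp only [h, maxLenOf_reverse, maxK]
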